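-- pv_equiv track=rewrite | github.com/rf-iasys/OEIS | OEIS_A276382.py | compute_max_y
-- ===== SOURCE A (Python) =====
-- def compute_max_y(n_start: int, n_end: int) -> dict[int, int]:
--     max_y_per_x = {}
--     for a in range(0, n_end // 2):
--         for b in range(a + 1, n_end - a + 1):
--             x = abs(a*a - b*b)
--             y = x * abs(a + b)
--             if y == 0 or x < n_start or x >= n_end:
--                 continue
--             if y > max_y_per_x.get(x, 0):
--                 max_y_per_x[x] = y
--     return max_y_per_x
-- ===== SOURCE B (Python) =====
-- def compute_max_y(n_start: int, n_end: int) -> dict[int, int]: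
--     # x = b*b - a*a = d * s with d = b - a and s = a + b = 2*a + d, so for each a
--     # generate x directly in increasing order of d and stop as soon as x reaches
--     # n_end: every later d only gives a larger x.  This visits O(n log n) pairs
--     # instead of scanning all (a, b).
--     best = {}
--     for a in range(0, n_end // 2):
--         d = 1
--         while True:
--             s = 2 * a + d
--             x = d * s
--             if x >= n_end:
--                 break
--             if x >= n_start:
--                 y = x * s
--                 if y > best.get(x, 0):
--                     best[x] = y
--             d += 1
--     return best
-- ===== Notes on version B (the rewrite author's own statement) =====
-- stated objective: faster
-- what changed: Instead of scanning all pairs (a,b) and filtering by x = |a^2-b^2| < n_end, B generates x = d*(2a+d) directly per a in increasing order of d = b-a and breaks the inner loop as soon as x reaches n_end, so only the O(n_end log n_end) in-range pairs are ever visited.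
import Mathlib
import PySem

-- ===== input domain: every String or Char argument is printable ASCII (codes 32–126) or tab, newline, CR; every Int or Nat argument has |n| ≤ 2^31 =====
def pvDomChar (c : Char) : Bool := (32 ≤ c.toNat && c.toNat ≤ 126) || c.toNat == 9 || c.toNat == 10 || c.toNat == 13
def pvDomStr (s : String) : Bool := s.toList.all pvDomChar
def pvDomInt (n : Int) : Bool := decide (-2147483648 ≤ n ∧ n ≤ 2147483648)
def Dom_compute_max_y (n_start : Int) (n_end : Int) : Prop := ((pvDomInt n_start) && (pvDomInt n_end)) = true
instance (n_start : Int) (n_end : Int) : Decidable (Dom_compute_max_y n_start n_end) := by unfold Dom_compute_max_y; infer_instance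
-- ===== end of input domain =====

-- B replaces A's scan of all pairs (a, b) by generating x = d*(2a+d) per a in increasing
-- order of d = b-a with an early break once x reaches n_end; objective: faster (asymptotic).

-- ===== PORT A =====
def compute_max_y (n_start : Int) (n_end : Int) : List (Int × Int) :=
  ((PySem.List.pyRange 0 (PySem.Int.floordiv n_end 2) 1).foldl (fun max_y_per_x a =>
      (PySem.List.pyRange (a + 1) (n_end - a + 1) 1).foldl (fun max_y_per_x b =>
        let x := |a * a - b * b|
        let y := x * |a + b|
        if y = 0 ∨ x < n_start ∨ n_end ≤ x then max_y_per_x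
        else if max_y_per_x.getD x 0 < y then max_y_per_x.insert x y
        else max_y_per_x) max_y_per_x)
    (PySem.Dict.empty : PySem.Dict Int Int)).items

-- ===== PORT B =====
-- the inner 'while True' loop of Source B: s = 2*a + d; x = d*s; break when x >= n_end,
-- otherwise keep (x, x*s) when x >= n_start and move to d + 1
-- the body of the while loop: keep y = x*s under the key x when x >= n_start
def pvKeep (n_start : Int) (x : Int) (s : Int) (best : PySem.Dict Int Int) : PySem.Dict Int Int :=
  if n_start ≤ x then
    (if best.getD x 0 < x * s then best.insert x (x * s) else best)
  else best

def pvInner (n_start : Int) (n_end : Int) (a : Int) (d : Int)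
    (best : PySem.Dict Int Int) : PySem.Dict Int Int :=
  if h : d * (2 * a + d) < n_end then
    pvInner n_start n_end a (d + 1) (pvKeep n_start (d * (2 * a + d)) (2 * a + d) best)
  else best
termination_by (2 * |a| + |n_end| + 1 - d).toNat
decreasing_by
  have hd : d < 2 * |a| + |n_end| + 1 := by
    by_contra hc
    push Not at hc
    have h1 : (1:Int) ≤ d := by
      have := abs_nonneg a
      have := abs_nonneg n_end
      omega
    have h2 : |n_end| + 1 ≤ 2 * a + d := by
      have := neg_abs_le a
      omega
    have h4 := le_abs_self n_end
    have h3 : 1 * (|n_end| + 1) ≤ d * (2 * a + d) :=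
      mul_le_mul h1 h2 (by positivity) (by omega)
    linarith
  omega

def compute_max_y_alt (n_start : Int) (n_end : Int) : List (Int × Int) :=
  ((PySem.List.pyRange 0 (PySem.Int.floordiv n_end 2) 1).foldl
    (fun best a => pvInner n_start n_end a 1 best)
    (PySem.Dict.empty : PySem.Dict Int Int)).items

-- ===== PRECONDITION & SPEC =====
def Spec_compute_max_y (n_start : Int) (n_end : Int) (out : List (Int × Int)) : Prop := out = compute_max_y_alt n_start n_end
instance (n_start : Int) (n_end : Int) (out : List (Int × Int)) : Decidable (Spec_compute_max_y n_start n_end out) := by unfold Spec_compute_max_y; infer_instance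

-- ===== CLAIM (what is proved, stated in full; the proofs are below) =====
def Claim_equal_compute_max_y : Prop := ∀ (n_start : Int) (n_end : Int), Dom_compute_max_y n_start n_end → Spec_compute_max_y n_start n_end (compute_max_y n_start n_end)

-- ===== LEMMAS AND PROOFS =====

-- the (x, y) entry A's inner loop keeps for the pair (a, b), if any
def pvEnt (ns ne a b : Int) : Option (Int × Int) :=
  if |a * a - b * b| * |a + b| = 0 ∨ |a * a - b * b| < ns ∨ ne ≤ |a * a - b * b| then none
  else some (|a * a - b * b|, |a * a - b * b| * |a + b|)

def pvBlock (ns ne a : Int) : List (Int × Int) :=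
  (PySem.List.pyRange (a + 1) (ne - a + 1) 1).filterMap (pvEnt ns ne a)

def pvStep (d : PySem.Dict Int Int) (p : Int × Int) : PySem.Dict Int Int :=
  if d.getD p.1 0 < p.2 then d.insert p.1 p.2 else d

theorem pv_abs_sq (a b : Int) (ha : 0 ≤ a) (hb : a < b) : |a * a - b * b| = b * b - a * a := by
  rw [abs_of_nonpos (by nlinarith)]
  ring

theorem pv_foldl_ext {α β : Type} (f g : β → α → β) (l : List α) (init : β)
    (h : ∀ d b, f d b = g d b) : l.foldl f init = l.foldl g init := by
  induction l generalizing init with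
  | nil => rfl
  | cons x t ih =>
    simp only [List.foldl_cons, h]
    exact ih _

-- A's result as a fold of pvStep over the kept entries of each a-block
theorem pv_A_eq (ns ne : Int) :
    compute_max_y ns ne =
      ((PySem.List.pyRange 0 (PySem.Int.floordiv ne 2) 1).foldl
        (fun dct a => (pvBlock ns ne a).foldl pvStep dct)
        (PySem.Dict.empty : PySem.Dict Int Int)).items := by
  unfold compute_max_y
  congr 1
  refine pv_foldl_ext _ _ _ _ ?_
  intro dct a
  unfold pvBlock
  rw [List.foldl_filterMap]
  refine pv_foldl_ext _ _ _ _ ?_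
  intro d b
  by_cases hc : |a * a - b * b| * |a + b| = 0 ∨ |a * a - b * b| < ns ∨ ne ≤ |a * a - b * b|
  · have hE : pvEnt ns ne a b = none := if_pos hc
    rw [hE]
    exact if_pos hc
  · have hE : pvEnt ns ne a b =
        some (|a * a - b * b|, |a * a - b * b| * |a + b|) := if_neg hc
    rw [hE]
    show (if |a * a - b * b| * |a + b| = 0 ∨ |a * a - b * b| < ns ∨ ne ≤ |a * a - b * b| then d
      else if d.getD |a * a - b * b| 0 < |a * a - b * b| * |a + b| then
        d.insert |a * a - b * b| (|a * a - b * b| * |a + b|) else d) =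
      pvStep d (|a * a - b * b|, |a * a - b * b| * |a + b|)
    rw [if_neg hc]
    rfl

-- every pair with b ≥ the break point is filtered out by A
theorem pv_ent_none_of_big (ns ne a b d : Int) (ha : 0 ≤ a) (hd : 1 ≤ d)
    (hb : a + d ≤ b) (h : ne ≤ d * (2 * a + d)) : pvEnt ns ne a b = none := by
  unfold pvEnt
  have hab : a < b := by omega
  rw [pv_abs_sq a b ha hab]
  refine if_pos (Or.inr (Or.inr ?_))
  nlinarith

-- B's inner loop from index d computes A's fold over the remaining pairs b ∈ [a+d, ne-a]
theorem pvInner_eq (ns ne a : Int) (ha : 0 ≤ a) :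
    ∀ d best, 1 ≤ d →
      pvInner ns ne a d best =
        ((PySem.List.pyRange (a + d) (ne - a + 1) 1).filterMap (pvEnt ns ne a)).foldl
          pvStep best := by
  intro d best
  induction d, best using pvInner.induct (n_start := ns) (n_end := ne) (a := a) with
  | case1 d best h ih =>
    intro hd
    have hs : 1 ≤ 2 * a + d := by omega
    have hxs : 2 * a + d ≤ d * (2 * a + d) := le_mul_of_one_le_left (by omega) hd
    have hcons : PySem.List.pyRange (a + d) (ne - a + 1) 1 =
        (a + d) :: PySem.List.pyRange (a + d + 1) (ne - a + 1) 1 :=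
      PySem.List.pyRange_one_cons (by omega)
    have hx : |a * a - (a + d) * (a + d)| = d * (2 * a + d) := by
      rw [pv_abs_sq a (a + d) ha (by omega)]
      ring
    have hy : |a + (a + d)| = 2 * a + d := by
      rw [show a + (a + d) = 2 * a + d by ring, abs_of_nonneg (by omega)]
    rw [pvInner, dif_pos h, ih (by omega), show a + (d + 1) = a + d + 1 by ring, hcons]
    by_cases hns : ns ≤ d * (2 * a + d)
    · have hE : pvEnt ns ne a (a + d) =
          some (d * (2 * a + d), d * (2 * a + d) * (2 * a + d)) := by
        unfold pvEnt
        rw [hx, hy]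
        rw [if_neg (by push Not; exact ⟨by nlinarith, by omega, by omega⟩)]
      rw [List.filterMap_cons_some hE, List.foldl_cons]
      have hkeep : pvKeep ns (d * (2 * a + d)) (2 * a + d) best =
          pvStep best (d * (2 * a + d), d * (2 * a + d) * (2 * a + d)) := by
        unfold pvKeep pvStep
        rw [if_pos hns]
      rw [hkeep]
    · have hE : pvEnt ns ne a (a + d) = none := by
        unfold pvEnt
        rw [hx, hy]
        exact if_pos (Or.inr (Or.inl (by omega)))
      rw [List.filterMap_cons_none hE]
      have hkeep : pvKeep ns (d * (2 * a + d)) (2 * a + d) best = best := by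
        unfold pvKeep
        rw [if_neg hns]
      rw [hkeep]
  | case2 d best h =>
    intro hd
    rw [pvInner, dif_neg h]
    have hnil : (PySem.List.pyRange (a + d) (ne - a + 1) 1).filterMap (pvEnt ns ne a) = [] := by
      rw [List.filterMap_eq_nil_iff]
      intro b hb
      rw [PySem.List.mem_pyRange_one] at hb
      exact pv_ent_none_of_big ns ne a b d ha hd hb.1 (by omega)
    rw [hnil]
    rfl

-- B's result as the same fold
theorem pv_B_eq (ns ne : Int) :
    compute_max_y_alt ns ne =
      ((PySem.List.pyRange 0 (PySem.Int.floordiv ne 2) 1).foldl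
        (fun dct a => (pvBlock ns ne a).foldl pvStep dct)
        (PySem.Dict.empty : PySem.Dict Int Int)).items := by
  unfold compute_max_y_alt
  congr 1
  refine PySem.List.foldl_congr_mem _ _ _ _ ?_
  intro best a haR
  rw [PySem.List.mem_pyRange_one] at haR
  rw [pvInner_eq ns ne a haR.1 1 best le_rfl]
  rfl

-- ===== VERDICT (by name: the statement is the Claim_ definition above) =====
theorem compute_max_y_spec : Claim_equal_compute_max_y := by
  intro ns ne _
  unfold Spec_compute_max_y
  rw [pv_A_eq, pv_B_eq]
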